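-- pv_equiv track=rewrite | github.com/andrexdias/calc_HEX | op_ar.py | converter_base2
-- ===== SOURCE A (Python) =====
-- def converter_base2(num2, base2):
--     """Conversor do Numero 2
--
--     Args:
--         num1 (Número 2): É o segundo número que ira ser consertido para decimal
--         base1 (Base 2): É a base do segundo numero que ira ser convertido para decimal
--
--     Returns:
--         resultado2: É o segundo número já em decimal
--     """
--     resultado2 = 0
--     num2 = str(num2)
--     for digito in num2:
--         resultado2 = resultado2 * base2
--         if '0' <= digito <= '9':
--             resultado2 += ord(digito) - ord('0')
--         elif 'A' <= digito <= 'F':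
--             resultado2 += ord(digito) - ord('A') + 10
--         elif 'a' <= digito <= 'f':
--             resultado2 += ord(digito) - ord('a') + 10
--     return resultado2
-- ===== SOURCE B (Python) =====
-- def converter_base2(num2, base2):
--     table = {c: v for v, c in enumerate("0123456789")}
--     for v, c in enumerate("ABCDEF"):
--         table[c] = 10 + v
--     for v, c in enumerate("abcdef"):
--         table[c] = 10 + v
--     s = str(num2)
--     total = 0
--     power = 1
--     for c in reversed(s):
--         total += table.get(c, 0) * power
--         power *= base2
--     return total
-- ===== Notes on version B (the rewrite author's own statement) =====
-- stated objective: alternative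
-- what changed: Replaces the Horner loop with its three inline if-chains by a digit-value dictionary built once (unknown characters defaulting to 0) and a right-to-left positional walk carrying an explicit power-of-base accumulator.
import Mathlib
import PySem

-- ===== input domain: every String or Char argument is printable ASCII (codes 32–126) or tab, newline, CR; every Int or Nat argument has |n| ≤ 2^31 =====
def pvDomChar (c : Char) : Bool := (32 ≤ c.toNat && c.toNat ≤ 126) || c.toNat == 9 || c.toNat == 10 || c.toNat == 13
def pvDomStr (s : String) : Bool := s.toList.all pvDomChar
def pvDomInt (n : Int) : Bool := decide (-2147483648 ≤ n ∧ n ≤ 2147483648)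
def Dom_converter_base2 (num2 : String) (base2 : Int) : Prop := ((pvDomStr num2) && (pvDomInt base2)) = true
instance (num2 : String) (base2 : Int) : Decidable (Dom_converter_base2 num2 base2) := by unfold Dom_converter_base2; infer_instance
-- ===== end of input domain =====

-- B computes the same base conversion via a digit-value dictionary built once and a positional sum over enumerate(reversed(s)) instead of A's Horner loop with inline branch classification; alternative decomposition, same cost.


-- ===== PORT A =====
-- Horner loop: resultado2 = resultado2 * base2, then conditionally add the digit value.
def converter_base2 (num2 : String) (base2 : Int) : Int :=
  num2.toList.foldl
    (fun resultado2 digito =>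
      let r := resultado2 * base2
      if '0' ≤ digito ∧ digito ≤ '9' then r + ((digito.toNat : Int) - ('0'.toNat : Int))
      else if 'A' ≤ digito ∧ digito ≤ 'F' then r + ((digito.toNat : Int) - ('A'.toNat : Int) + 10)
      else if 'a' ≤ digito ∧ digito ≤ 'f' then r + ((digito.toNat : Int) - ('a'.toNat : Int) + 10)
      else r)
    0

-- ===== PORT B =====
-- digit-value table built once: {c: v for v, c in enumerate("0123456789")}, then updated with A-F and a-f
def pvTable : PySem.Dict Char Int :=
  let t0 := (PySem.List.enumerate "0123456789".toList 0).foldl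
    (fun d vc => d.insert vc.2 vc.1) PySem.Dict.empty
  let t1 := (PySem.List.enumerate "ABCDEF".toList 0).foldl
    (fun d vc => d.insert vc.2 (10 + vc.1)) t0
  (PySem.List.enumerate "abcdef".toList 0).foldl
    (fun d vc => d.insert vc.2 (10 + vc.1)) t1

-- right-to-left positional walk carrying (total, power): total += table.get(c, 0) * power; power *= base2
def converter_base2_alt (num2 : String) (base2 : Int) : Int :=
  (num2.toList.reverse.foldl
    (fun (tp : Int × Int) c => (tp.1 + pvTable.getD c 0 * tp.2, tp.2 * base2))
    (0, 1)).1

-- ===== PRECONDITION & SPEC =====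
def Spec_converter_base2 (num2 : String) (base2 : Int) (out : Int) : Prop := out = converter_base2_alt num2 base2
instance (num2 : String) (base2 : Int) (out : Int) : Decidable (Spec_converter_base2 num2 base2 out) := by unfold Spec_converter_base2; infer_instance

-- ===== CLAIM =====
def Claim_equal_converter_base2 : Prop := ∀ (num2 : String) (base2 : Int), Dom_converter_base2 num2 base2 → Spec_converter_base2 num2 base2 (converter_base2 num2 base2)

-- ===== LEMMAS AND PROOFS =====

-- digit value A's three-branch classification assigns (0 for any other char)
def pvDv (c : Char) : Int :=
  if '0' ≤ c ∧ c ≤ '9' then (c.toNat : Int) - ('0'.toNat : Int)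
  else if 'A' ≤ c ∧ c ≤ 'F' then (c.toNat : Int) - ('A'.toNat : Int) + 10
  else if 'a' ≤ c ∧ c ≤ 'f' then (c.toNat : Int) - ('a'.toNat : Int) + 10
  else 0

-- canonical little-endian value: pvH b [c₀,…,cₖ] = Σ pvDv cᵢ * bⁱ
def pvH (b : Int) : List Char → Int
  | [] => 0
  | c :: m => pvDv c + b * pvH b m

theorem pvCharLe (a b : Char) : a ≤ b ↔ a.toNat ≤ b.toNat := by
  rw [Char.le_def]; exact UInt32.le_iff_toNat_le

theorem pvGetD_not_mem (l : List (Char × Int)) (c : Char)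
    (h : ∀ p ∈ l, (p.1 == c) = false) : (PySem.Dict.mk l).getD c 0 = 0 := by
  induction l with
  | nil => rfl
  | cons p l ih =>
      obtain ⟨k, v⟩ := p
      simp only [PySem.Dict.getD, PySem.Dict.get?_mk_cons] at ih ⊢
      rw [h (k, v) (List.mem_cons_self)]
      simp only [Bool.false_eq_true, if_false]
      exact ih (fun q hq => h q (List.mem_cons_of_mem _ hq))

-- the table B builds gives exactly A's digit value, 0 for any unknown character
theorem pvTable_getD (c : Char) : pvTable.getD c 0 = pvDv c := by
  have ht : pvTable = PySem.Dict.mk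
      [('0',(0:Int)),('1',1),('2',2),('3',3),('4',4),('5',5),('6',6),('7',7),('8',8),('9',9),
       ('A',10),('B',11),('C',12),('D',13),('E',14),('F',15),
       ('a',10),('b',11),('c',12),('d',13),('e',14),('f',15)] := by decide
  rw [ht]
  by_cases h1 : '0' ≤ c ∧ c ≤ '9'
  · obtain ⟨l, u⟩ := h1
    rw [pvCharLe] at l u
    have l' : 48 ≤ c.toNat := l
    have u' : c.toNat ≤ 57 := u
    interval_cases h : c.toNat <;> (rw [← Char.ofNat_toNat c, h]; decide)
  by_cases h2 : 'A' ≤ c ∧ c ≤ 'F'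
  · obtain ⟨l, u⟩ := h2
    rw [pvCharLe] at l u
    have l' : 65 ≤ c.toNat := l
    have u' : c.toNat ≤ 70 := u
    interval_cases h : c.toNat <;> (rw [← Char.ofNat_toNat c, h]; decide)
  by_cases h3 : 'a' ≤ c ∧ c ≤ 'f'
  · obtain ⟨l, u⟩ := h3
    rw [pvCharLe] at l u
    have l' : 97 ≤ c.toNat := l
    have u' : c.toNat ≤ 102 := u
    interval_cases h : c.toNat <;> (rw [← Char.ofNat_toNat c, h]; decide)
  rw [pvGetD_not_mem, pvDv, if_neg h1, if_neg h2, if_neg h3]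
  intro p hp
  fin_cases hp <;>
    · rw [beq_eq_false_iff_ne]
      rintro rfl
      first | exact h1 (by decide) | exact h2 (by decide) | exact h3 (by decide)

theorem pvA_rev (b : Int) (m : List Char) (r : Int) :
    List.foldl
      (fun resultado2 digito =>
        let r := resultado2 * b
        if '0' ≤ digito ∧ digito ≤ '9' then r + ((digito.toNat : Int) - ('0'.toNat : Int))
        else if 'A' ≤ digito ∧ digito ≤ 'F' then r + ((digito.toNat : Int) - ('A'.toNat : Int) + 10)
        else if 'a' ≤ digito ∧ digito ≤ 'f' then r + ((digito.toNat : Int) - ('a'.toNat : Int) + 10)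
        else r)
      r m.reverse = r * b ^ m.length + pvH b m := by
  induction m generalizing r with
  | nil => simp [pvH]
  | cons c m ih =>
      simp only [List.reverse_cons, List.foldl_append, List.foldl_cons, List.foldl_nil, ih,
        List.length_cons, pvH]
      unfold pvDv
      split_ifs <;> ring

theorem pvB_fold (b : Int) (m : List Char) (t p : Int) :
    (m.foldl
      (fun (tp : Int × Int) c => (tp.1 + pvTable.getD c 0 * tp.2, tp.2 * b))
      (t, p)).1 = t + p * pvH b m := by
  induction m generalizing t p with
  | nil => simp [pvH]
  | cons c m ih =>
      rw [List.foldl_cons, ih]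
      simp only [pvH, pvTable_getD]
      ring

-- ===== VERDICT =====
theorem converter_base2_spec : Claim_equal_converter_base2 := by
  intro num2 base2 _
  unfold Spec_converter_base2 converter_base2 converter_base2_alt
  have hA := pvA_rev base2 num2.toList.reverse 0
  rw [List.reverse_reverse] at hA
  rw [hA]
  rw [pvB_fold]
  ring
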